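-- pv_equiv track=rewrite | github.com/Jang-Jaewon/Algorithm-Study | basic/006_정다면체.py | solution
-- ===== SOURCE A (Python) =====
-- def solution(N, M):
--   d = {}
--   res = []
--   l = sorted([i+j for i in range(1, N+1) for j in range(1, M+1)])
--   for i in l:
--     if i not in d:
--       d[i] = l.count(i)
--   for i in d:
--     if d[i] == max(d.values()):
--       res.append(i)
--   return res
-- ===== SOURCE B (Python) =====
-- def solution(N, M):
--     if N <= 0 or M <= 0:
--         return []
--     return list(range(min(N, M) + 1, max(N, M) + 2))
-- ===== Notes on version B (the rewrite author's own statement) =====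
-- stated objective: faster
-- what changed: A enumerates all N*M pair sums, sorts them, calls list.count and max(d.values()) inside loops; B returns the closed-form answer list(range(min(N,M)+1, max(N,M)+2)) (empty if N<=0 or M<=0), since the sum distribution is trapezoidal with maximum frequency min(N,M) attained exactly on that contiguous range.
import Mathlib
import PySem

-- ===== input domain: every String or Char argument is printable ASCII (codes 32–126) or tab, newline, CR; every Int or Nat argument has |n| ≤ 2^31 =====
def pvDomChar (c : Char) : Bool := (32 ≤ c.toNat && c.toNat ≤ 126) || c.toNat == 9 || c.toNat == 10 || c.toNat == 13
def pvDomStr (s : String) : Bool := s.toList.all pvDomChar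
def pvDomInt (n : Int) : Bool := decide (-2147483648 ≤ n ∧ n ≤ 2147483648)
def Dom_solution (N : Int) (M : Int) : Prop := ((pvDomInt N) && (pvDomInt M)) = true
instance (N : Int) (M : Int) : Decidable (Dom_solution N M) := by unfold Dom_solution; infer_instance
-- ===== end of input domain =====

-- B replaces A's enumerate-sort-count-scan of all N*M pair sums by the closed form
-- range(min(N,M)+1, max(N,M)+2) (empty when N<=0 or M<=0); the return values agree everywhere.

-- ===== PORT A =====
def solution (N : Int) (M : Int) : List Int :=
  let l := PySem.List.sorted
      ((PySem.List.pyRange 1 (N+1) 1).flatMap (fun i =>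
        (PySem.List.pyRange 1 (M+1) 1).map (fun j => i + j))) (fun x => x) false
  let d := l.foldl (fun d i =>
      if !(PySem.Dict.contains d i) then d.insert i ((PySem.List.count l i : Int)) else d)
      PySem.Dict.empty
  (PySem.Dict.keys d).foldl (fun res i =>
      if PySem.Dict.get? d i = PySem.List.max? (PySem.Dict.values d) (fun x => x)
      then res ++ [i] else res) []

-- ===== PORT B =====
def solution_alt (N : Int) (M : Int) : List Int :=
  if N ≤ 0 ∨ M ≤ 0 then []
  else PySem.List.pyRange (min N M + 1) (max N M + 2) 1

-- ===== PRECONDITION & SPEC =====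
def Spec_solution (N : Int) (M : Int) (out : List Int) : Prop := out = solution_alt N M
instance (N : Int) (M : Int) (out : List Int) : Decidable (Spec_solution N M out) := by unfold Spec_solution; infer_instance

-- ===== CLAIM (what is proved, stated in full; the proofs are below) =====
def Claim_equal_solution : Prop := ∀ (N : Int) (M : Int), Dom_solution N M → Spec_solution N M (solution N M)

-- ===== LEMMAS AND PROOFS =====

-- multiplicity of the sum s among pairs (i,j) ∈ [1,N]×[1,M] (before truncation at 0)
def pvCnt (N M s : Int) : Int := min N (s-1) - max 1 (s-M) + 1

-- the multiset of sums, unsorted (A's comprehension)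
def pvL0 (N M : Int) : List Int :=
  (PySem.List.pyRange 1 (N+1) 1).flatMap (fun i =>
    (PySem.List.pyRange 1 (M+1) 1).map (fun j => i + j))

-- the sorted list of sums, written block by block
def pvCanon (N M : Int) : List Int :=
  (PySem.List.pyRange 2 (N+M+1) 1).flatMap (fun s => List.replicate (pvCnt N M s).toNat s)

-- A's dict-building loop body, abstracted over the counted list
def pvStep (lc : List Int) (d : PySem.Dict Int Int) (i : Int) : PySem.Dict Int Int :=
  if !(PySem.Dict.contains d i) then d.insert i ((PySem.List.count lc i : Int)) else d

-- A's dict, built over the canonical sorted list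
def pvD (N M : Int) : PySem.Dict Int Int :=
  (pvCanon N M).foldl (pvStep (pvCanon N M)) PySem.Dict.empty

lemma pvFilterInterval (x y : Int) : ∀ (n : Nat) (lo hi : Int), (hi - lo).toNat ≤ n →
    (PySem.List.pyRange lo hi 1).filter (fun s => decide (x ≤ s ∧ s ≤ y))
      = PySem.List.pyRange (max lo x) (min hi (y+1)) 1 := by
  intro n
  induction n with
  | zero =>
    intro lo hi h
    rw [PySem.List.pyRange_one_eq_nil (by omega), PySem.List.pyRange_one_eq_nil (by omega)]
    rfl
  | succ n ih =>
    intro lo hi h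
    by_cases hlt : lo < hi
    · rw [PySem.List.pyRange_one_cons hlt, List.filter_cons]
      by_cases hx : x ≤ lo ∧ lo ≤ y
      · have hd : decide (x ≤ lo ∧ lo ≤ y) = true := by simpa using hx
        rw [hd, if_pos rfl, ih (lo+1) hi (by omega),
          show max (lo+1) x = lo + 1 from by omega,
          show (max lo x) = lo from by omega,
          PySem.List.pyRange_one_cons (a := lo) (b := min hi (y+1)) (by omega)]
      · have hd : decide (x ≤ lo ∧ lo ≤ y) = false := by simpa using hx
        rw [hd, if_neg (by simp), ih (lo+1) hi (by omega)]
        by_cases hxl : x ≤ lo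
        · rw [PySem.List.pyRange_one_eq_nil (by omega), PySem.List.pyRange_one_eq_nil (by omega)]
        · rw [show max (lo+1) x = max lo x from by omega]
    · rw [PySem.List.pyRange_one_eq_nil (by omega), PySem.List.pyRange_one_eq_nil (by omega)]
      rfl

lemma pvCountPyRange (a b x : Int) :
    List.count x (PySem.List.pyRange a b 1) = if a ≤ x ∧ x < b then 1 else 0 := by
  rw [List.Nodup.count (PySem.List.nodup_pyRange_one a b)]
  simp [PySem.List.mem_pyRange_one]

lemma pvCountL0 (N M s : Int) : List.count s (pvL0 N M) = (pvCnt N M s).toNat := by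
  unfold pvL0
  rw [List.count_flatMap]
  have hmap : ((PySem.List.pyRange 1 (N+1) 1).map
      (List.count s ∘ fun i => (PySem.List.pyRange 1 (M+1) 1).map (fun j => i + j)))
      = (PySem.List.pyRange 1 (N+1) 1).map (fun i => if s - M ≤ i ∧ i ≤ s - 1 then 1 else 0) := by
    apply List.map_congr_left
    intro i _
    have h2 := List.count_map_of_injective (x := s - i) (f := fun j => i + j)
      (PySem.List.pyRange 1 (M+1) 1) (fun a b h => by simpa using h)
    simp only [Function.comp_apply]
    have h3 : i + (s - i) = s := by ring
    rw [h3] at h2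
    rw [h2, pvCountPyRange]
    have : (1 ≤ s - i ∧ s - i < M + 1) ↔ (s - M ≤ i ∧ i ≤ s - 1) := by omega
    simp only [this]
  rw [hmap, PySem.List.sum_map_ite_one_zero_nat' (fun i => s - M ≤ i ∧ i ≤ s - 1),
    List.countP_eq_length_filter]
  rw [show (fun i => decide (s - M ≤ i ∧ i ≤ s - 1)) = (fun i => decide (s - M ≤ i ∧ i ≤ s - 1)) from rfl]
  rw [pvFilterInterval (s-M) (s-1) (N+1-1).toNat 1 (N+1) (by omega), PySem.List.length_pyRange_one]
  unfold pvCnt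
  omega

lemma pvNotMemFlat (c : Int → Nat) (s : Int) (ss : List Int) (h : s ∉ ss) :
    s ∉ ss.flatMap (fun t => List.replicate (c t) t) := by
  intro hmem
  obtain ⟨t, ht, hmt⟩ := List.mem_flatMap.mp hmem
  rw [List.eq_of_mem_replicate hmt] at h
  exact h ht

lemma pvCountCanon (N M s : Int) (hN : 1 ≤ N) (_hM : 1 ≤ M) :
    List.count s (pvCanon N M) = (pvCnt N M s).toNat := by
  unfold pvCanon
  by_cases h : 2 ≤ s ∧ s ≤ N + M
  · rw [PySem.List.pyRange_one_append 2 s (N+M+1) (by omega) (by omega),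
      PySem.List.pyRange_one_append s (s+1) (N+M+1) (by omega) (by omega),
      PySem.List.pyRange_one_singleton]
    simp only [List.flatMap_append, List.count_append, List.flatMap_cons, List.flatMap_nil,
      List.append_nil]
    rw [List.count_eq_zero_of_not_mem (pvNotMemFlat _ s _ (by simp only [PySem.List.mem_pyRange_one, not_and, not_lt]; omega)),
      List.count_eq_zero_of_not_mem (pvNotMemFlat _ s _ (by simp only [PySem.List.mem_pyRange_one, not_and, not_lt]; omega)),
      List.count_replicate]
    simp
  · rw [List.count_eq_zero_of_not_mem (pvNotMemFlat _ s _ (by simp only [PySem.List.mem_pyRange_one, not_and, not_lt]; omega))]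
    unfold pvCnt
    omega

lemma pvPairwiseFlat (c : Int → Nat) : ∀ ss : List Int, ss.Pairwise (· < ·) →
    (ss.flatMap fun s => List.replicate (c s) s).Pairwise (· ≤ ·) := by
  intro ss
  induction ss with
  | nil => intro _; simp
  | cons s t ih =>
    intro hp
    rw [List.pairwise_cons] at hp
    rw [List.flatMap_cons, List.pairwise_append]
    refine ⟨List.pairwise_replicate.mpr (Or.inr le_rfl), ih hp.2, ?_⟩
    intro a ha b hb
    rw [List.eq_of_mem_replicate ha]
    obtain ⟨u, hu, hbu⟩ := List.mem_flatMap.mp hb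
    rw [List.eq_of_mem_replicate hbu]
    exact le_of_lt (hp.1 u hu)

lemma pvMemCanon (N M s : Int) (hN : 1 ≤ N) (_hM : 1 ≤ M)
    (h : s ∈ PySem.List.pyRange 2 (N+M+1) 1) : s ∈ pvCanon N M := by
  have hb := PySem.List.mem_pyRange_one.mp h
  refine List.mem_flatMap.mpr ⟨s, h, ?_⟩
  refine List.mem_replicate.mpr ⟨?_, rfl⟩
  unfold pvCnt
  omega

lemma pvSortedEqCanon (N M : Int) (hN : 1 ≤ N) (hM : 1 ≤ M) :
    PySem.List.sorted (pvL0 N M) (fun x => x) false = pvCanon N M := by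
  apply List.Perm.eq_of_pairwise (le := (· ≤ ·))
  · intro a b _ _ h1 h2; omega
  · exact PySem.List.sorted_pairwise (pvL0 N M) (fun x => x)
  · exact pvPairwiseFlat _ _ (PySem.List.pairwise_lt_pyRange_one 2 (N+M+1))
  · exact (PySem.List.sorted_perm _ _ _).trans (List.perm_iff_count.mpr fun a => by
      rw [pvCountL0, pvCountCanon N M a hN hM])

lemma pvFoldGet (lc : List Int) : ∀ (t : List Int) (d : PySem.Dict Int Int) (s : Int),
    (t.foldl (pvStep lc) d).get? s
      = if d.contains s then d.get? s
        else if s ∈ t then some ((PySem.List.count lc s : Int)) else none := by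
  intro t
  induction t with
  | nil =>
    intro d s
    by_cases h : d.contains s
    · simp [h]
    · simp only [Bool.not_eq_true] at h
      simp [h, (PySem.Dict.get?_eq_none_iff_contains d s).mpr h]
  | cons i t ih =>
    intro d s
    rw [List.foldl_cons, ih]
    by_cases hci : d.contains i
    · have hstep : pvStep lc d i = d := by simp [pvStep, hci]
      rw [hstep]
      by_cases hcs : d.contains s
      · simp [hcs]
      · have hsi : s ≠ i := fun h => by rw [h] at hcs; exact hcs hci
        simp [hcs, List.mem_cons, hsi]
    · simp only [Bool.not_eq_true] at hci
      have hstep : pvStep lc d i = d.insert i ((PySem.List.count lc i : Int)) := by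
        simp [pvStep, hci]
      rw [hstep]
      by_cases hsi : s = i
      · subst hsi
        simp [PySem.Dict.contains_insert_self, PySem.Dict.get?_insert_self, hci]
      · rw [PySem.Dict.contains_insert]
        rw [show (s == i) = false from by simp [hsi], Bool.false_or]
        rw [PySem.Dict.get?_insert_of_ne _ _ hsi]
        by_cases hcs : d.contains s
        · simp [hcs]
        · simp [hcs, List.mem_cons, hsi]

lemma pvFoldKeys (lc : List Int) : ∀ (t : List Int) (d : PySem.Dict Int Int),
    (t.foldl (pvStep lc) d).keys = PySem.Set.update d.keys t := by
  intro t
  induction t with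
  | nil => intro d; rfl
  | cons i t ih =>
    intro d
    rw [List.foldl_cons, ih]
    have : (pvStep lc d i).keys = PySem.Set.add d.keys i := by
      by_cases hci : d.contains i
      · have : i ∈ d.keys := (PySem.Dict.contains_iff_mem_keys d i).mp hci
        simp [pvStep, hci, PySem.Set.add, PySem.Set.contains, this]
      · simp only [Bool.not_eq_true] at hci
        have hmem : i ∉ d.keys := fun h =>
          absurd ((PySem.Dict.contains_iff_mem_keys d i).mpr h) (by simp [hci])
        rw [pvStep, if_pos (by simp [hci]), PySem.Dict.keys_insert_of_not_contains d _ hci]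
        simp [PySem.Set.add, PySem.Set.contains, hmem]
    rw [this]
    rfl

lemma pvUpdateRep : ∀ (m : Nat) (acc : List Int) (s : Int), s ∈ acc →
    PySem.Set.update acc (List.replicate m s) = acc := by
  intro m
  induction m with
  | zero => intro acc s _; rfl
  | succ m ih =>
    intro acc s hmem
    rw [List.replicate_succ]
    show PySem.Set.update (PySem.Set.add acc s) (List.replicate m s) = acc
    rw [show PySem.Set.add acc s = acc from by simp [PySem.Set.add, PySem.Set.contains, hmem]]
    exact ih acc s hmem

lemma pvUpdateFlat (c : Int → Nat) : ∀ (ss acc : List Int), ss.Nodup →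
    (∀ s ∈ ss, s ∉ acc) → (∀ s ∈ ss, 0 < c s) →
    PySem.Set.update acc (ss.flatMap fun s => List.replicate (c s) s) = acc ++ ss := by
  intro ss
  induction ss with
  | nil => intro acc _ _ _; simp
  | cons s t ih =>
    intro acc hnd hdisj hpos
    rw [List.flatMap_cons]
    show PySem.Set.update acc (List.replicate (c s) s ++ t.flatMap fun u => List.replicate (c u) u) = acc ++ s :: t
    rw [show ∀ xs ys, PySem.Set.update acc (xs ++ ys) = PySem.Set.update (PySem.Set.update acc xs) ys
      from fun xs ys => List.foldl_append]
    obtain ⟨m, hm⟩ : ∃ m, c s = m + 1 := ⟨c s - 1, by have := hpos s (by simp); omega⟩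
    rw [hm, List.replicate_succ]
    have hsacc : s ∉ acc := hdisj s (by simp)
    have hadd : PySem.Set.add acc s = acc ++ [s] := by
      simp [PySem.Set.add, PySem.Set.contains, hsacc]
    show PySem.Set.update (PySem.Set.update (PySem.Set.add acc s) (List.replicate m s)) _ = _
    rw [hadd] at *
    rw [pvUpdateRep m (acc ++ [s]) s (by simp)]
    rw [List.nodup_cons] at hnd
    rw [ih (acc ++ [s]) hnd.2 (fun u hu => by
        simp only [List.mem_append, List.mem_singleton]
        rintro (h | h)
        · exact hdisj u (by simp [hu]) h
        · exact hnd.1 (h ▸ hu))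
      (fun u hu => hpos u (by simp [hu]))]
    simp

lemma pvEmpty (N M : Int) (h : N ≤ 0 ∨ M ≤ 0) : solution N M = [] := by
  unfold solution
  have hL0 : ((PySem.List.pyRange 1 (N+1) 1).flatMap (fun i =>
      (PySem.List.pyRange 1 (M+1) 1).map (fun j => i + j))) = [] := by
    rcases h with h | h
    · rw [PySem.List.pyRange_one_eq_nil (a := 1) (b := N+1) (by omega)]; rfl
    · rw [PySem.List.pyRange_one_eq_nil (a := 1) (b := M+1) (by omega)]
      simp
  rw [hL0]
  rfl

lemma pvSolutionEq (N M : Int) (hN : 1 ≤ N) (hM : 1 ≤ M) :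
    solution N M = (PySem.Dict.keys (pvD N M)).foldl
      (fun res i => if PySem.Dict.get? (pvD N M) i
          = PySem.List.max? (PySem.Dict.values (pvD N M)) (fun x => x)
        then res ++ [i] else res) [] := by
  have h := pvSortedEqCanon N M hN hM
  show (let l := PySem.List.sorted (pvL0 N M) (fun x => x) false
        let d := l.foldl (pvStep l) PySem.Dict.empty
        (PySem.Dict.keys d).foldl (fun res i =>
          if PySem.Dict.get? d i = PySem.List.max? (PySem.Dict.values d) (fun x => x)
          then res ++ [i] else res) []) = _
  rw [h]
  rfl

lemma pvMain (N M : Int) (hN : 1 ≤ N) (hM : 1 ≤ M) : solution N M = solution_alt N M := by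
  have hne : ¬ (N ≤ 0 ∨ M ≤ 0) := by omega
  rw [solution_alt, if_neg hne, pvSolutionEq N M hN hM]
  set K := PySem.List.pyRange 2 (N+M+1) 1 with hK
  have hnd : K.Nodup := PySem.List.nodup_pyRange_one 2 (N+M+1)
  have hkeys : (pvD N M).keys = K := by
    rw [pvD, pvFoldKeys, PySem.Dict.keys_empty, pvCanon,
      pvUpdateFlat _ K [] hnd (by simp) (fun s hs => by
        have := PySem.List.mem_pyRange_one.mp hs
        unfold pvCnt; omega)]
    simp
  have hget : ∀ s ∈ K, (pvD N M).get? s = some (((pvCnt N M s).toNat : Int)) := by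
    intro s hs
    rw [pvD, pvFoldGet, if_neg (by simp [PySem.Dict.contains_empty]),
      if_pos (pvMemCanon N M s hN hM hs), PySem.List.count_eq, pvCountCanon N M s hN hM]
  have hvals : (pvD N M).values = K.map (fun s => ((pvCnt N M s).toNat : Int)) := by
    rw [PySem.Dict.values_eq_map_keys (pvD N M) (hkeys ▸ hnd) 0, hkeys]
    apply List.map_congr_left
    intro s hs
    rw [PySem.Dict.getD_eq_get?_getD, hget s hs]
    rfl
  have hmax : PySem.List.max? ((pvD N M).values) (fun x => x) = some (min N M) := by
    have hmem1 : (min N M + 1) ∈ K := by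
      rw [hK, PySem.List.mem_pyRange_one]; omega
    have hamem : (min N M) ∈ (pvD N M).values := by
      rw [hvals]
      refine List.mem_map.mpr ⟨min N M + 1, hmem1, ?_⟩
      unfold pvCnt; omega
    obtain ⟨m, hm⟩ : ∃ m, PySem.List.max? ((pvD N M).values) (fun x => x) = some m := by
      cases hcase : PySem.List.max? ((pvD N M).values) (fun x => x) with
      | none =>
        exfalso
        have := (PySem.List.max?_eq_none_iff _ _).mp hcase
        rw [this] at hamem
        exact List.not_mem_nil hamem
      | some m => exact ⟨m, rfl⟩
    have hub : m ≤ min N M := by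
      have := PySem.List.max?_mem hm
      rw [hvals] at this
      obtain ⟨s, hs, hval⟩ := List.mem_map.mp this
      have hb := PySem.List.mem_pyRange_one.mp (hK ▸ hs)
      rw [← hval]
      unfold pvCnt
      omega
    have hlb : min N M ≤ m := PySem.List.max?_isMax hm _ hamem
    rw [hm, Int.le_antisymm hub hlb]
  rw [PySem.List.foldl_append_ite_eq_filter
      (fun i => PySem.Dict.get? (pvD N M) i
        = PySem.List.max? (PySem.Dict.values (pvD N M)) (fun x => x)), hkeys]
  rw [List.filter_congr (q := fun s => decide (min N M + 1 ≤ s ∧ s ≤ max N M + 1))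
      (fun s hs => by
        have hb := PySem.List.mem_pyRange_one.mp (hK ▸ hs)
        rw [decide_eq_decide]
        rw [hget s hs, hmax, Option.some_inj]
        unfold pvCnt
        omega)]
  rw [hK, pvFilterInterval _ _ (N+M+1-2).toNat 2 (N+M+1) (by omega)]
  rw [show max 2 (min N M + 1) = min N M + 1 from by omega,
    show min (N+M+1) (max N M + 1 + 1) = max N M + 2 from by omega]
  simp

-- ===== VERDICT (by name: the statement is the Claim_ definition above) =====
theorem solution_spec : Claim_equal_solution := by
  intro N M _
  unfold Spec_solution
  by_cases h : N ≤ 0 ∨ M ≤ 0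
  · rw [pvEmpty N M h, solution_alt, if_pos h]
  · exact pvMain N M (by omega) (by omega)
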